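-- pv_equiv track=rewrite | github.com/leonematt/nexus | tools/cuda_kc.py | _smart_parameter_split
-- ===== SOURCE A (Python) =====
-- from typing import Dict, List, Optional, Tuple
--
-- def _smart_parameter_split(params_str: str) -> List[str]:
--     """Smart parameter splitting that handles nested templates and function pointers."""
--     params = []
--     current_param = ""
--     paren_depth = 0
--     template_depth = 0
--
--     for char in params_str:
--         if char == ',' and paren_depth == 0 and template_depth == 0:
--             if current_param.strip():
--                 params.append(current_param.strip())
--             current_param = ""
--         else:
--             current_param += char
--
--             if char == '(':
--                 paren_depth += 1
--             elif char == ')':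
--                 paren_depth -= 1
--             elif char == '<':
--                 template_depth += 1
--             elif char == '>':
--                 template_depth -= 1
--
--     if current_param.strip():
--         params.append(current_param.strip())
--
--     return params
-- ===== SOURCE B (Python) =====
-- from typing import List
--
-- def _smart_parameter_split(params_str: str) -> List[str]:
--     """Index/slice based splitter: keeps a start cursor instead of an accumulating buffer."""
--     params = []
--     start = 0
--     paren_depth = 0
--     template_depth = 0
--     for i, char in enumerate(params_str):
--         if char == ',' and paren_depth == 0 and template_depth == 0:
--             seg = params_str[start:i].strip()
--             if seg:
--                 params.append(seg)
--             start = i + 1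
--         elif char == '(':
--             paren_depth += 1
--         elif char == ')':
--             paren_depth -= 1
--         elif char == '<':
--             template_depth += 1
--         elif char == '>':
--             template_depth -= 1
--     seg = params_str[start:].strip()
--     if seg:
--         params.append(seg)
--     return params
-- ===== Notes on version B (the rewrite author's own statement) =====
-- stated objective: alternative
-- what changed: Replaces the growing current_param buffer with a start-index cursor and enumerate: segments are produced by slicing params_str[start:i] instead of character-by-character concatenation, and the depth updates become an elif chain at the top level.
import Mathlib
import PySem

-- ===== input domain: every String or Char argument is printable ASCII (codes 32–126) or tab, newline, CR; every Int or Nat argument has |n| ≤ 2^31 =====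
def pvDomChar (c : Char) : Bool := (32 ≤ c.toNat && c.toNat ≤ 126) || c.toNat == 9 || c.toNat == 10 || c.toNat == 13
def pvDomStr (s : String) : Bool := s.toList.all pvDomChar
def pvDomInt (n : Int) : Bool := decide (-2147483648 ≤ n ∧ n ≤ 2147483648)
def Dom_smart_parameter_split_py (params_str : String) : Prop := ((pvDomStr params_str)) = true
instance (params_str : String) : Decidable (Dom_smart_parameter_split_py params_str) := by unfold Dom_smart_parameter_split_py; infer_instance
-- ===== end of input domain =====

-- B keeps a start cursor and slices the input instead of growing a character buffer (objective: alternative).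

-- ===== PORT A =====
-- loop over the remaining characters, carrying (params, current_param, paren_depth, template_depth)
def pvLoopA : List Char → List String → List Char → Int → Int → List String
  | [], acc, cur, _, _ =>
      if PySem.Chars.strip cur ≠ [] then acc ++ [String.ofList (PySem.Chars.strip cur)] else acc
  | c :: rest, acc, cur, pd, td =>
      if c = ',' ∧ pd = 0 ∧ td = 0 then
        pvLoopA rest
          (if PySem.Chars.strip cur ≠ [] then acc ++ [String.ofList (PySem.Chars.strip cur)] else acc)
          [] pd td
      else
        pvLoopA rest acc (cur ++ [c])
          (if c = '(' then pd + 1 else if c = ')' then pd - 1 else pd)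
          (if c = '(' ∨ c = ')' then td else if c = '<' then td + 1 else if c = '>' then td - 1 else td)

def smart_parameter_split_py (params_str : String) : List String :=
  pvLoopA params_str.toList [] [] 0 0

-- ===== PORT B =====
-- loop over the remaining characters with the running index i, carrying (params, start, paren_depth, template_depth);
-- segments are slices params_str[start:i] of the original string s
def pvLoopB (s : List Char) : List Char → Nat → List String → Nat → Int → Int → List String
  | [], _, acc, start, _, _ =>
      let seg := PySem.Chars.strip (PySem.List.slice s (some (start : Int)) none)
      if seg ≠ [] then acc ++ [String.ofList seg] else acc
  | c :: rest, i, acc, start, pd, td =>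
      if c = ',' ∧ pd = 0 ∧ td = 0 then
        let seg := PySem.Chars.strip (PySem.List.slice s (some (start : Int)) (some (i : Int)))
        pvLoopB s rest (i + 1) (if seg ≠ [] then acc ++ [String.ofList seg] else acc) (i + 1) pd td
      else if c = '(' then pvLoopB s rest (i + 1) acc start (pd + 1) td
      else if c = ')' then pvLoopB s rest (i + 1) acc start (pd - 1) td
      else if c = '<' then pvLoopB s rest (i + 1) acc start pd (td + 1)
      else if c = '>' then pvLoopB s rest (i + 1) acc start pd (td - 1)
      else pvLoopB s rest (i + 1) acc start pd td

def smart_parameter_split_py_alt (params_str : String) : List String :=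
  pvLoopB params_str.toList params_str.toList 0 [] 0 0 0

-- ===== PRECONDITION & SPEC =====
def Spec_smart_parameter_split_py (params_str : String) (out : List String) : Prop := out = smart_parameter_split_py_alt params_str
instance (params_str : String) (out : List String) : Decidable (Spec_smart_parameter_split_py params_str out) := by unfold Spec_smart_parameter_split_py; infer_instance

-- ===== CLAIM (what is proved, stated in full; the proofs are below) =====
def Claim_equal_smart_parameter_split_py : Prop := ∀ (params_str : String), Dom_smart_parameter_split_py params_str → Spec_smart_parameter_split_py params_str (smart_parameter_split_py params_str)

-- ===== LEMMAS AND PROOFS =====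

-- the slice params_str[start:i] taken by B is exactly A's current buffer (the characters from start to the current position)
lemma pvSlice_pre (pre rest : List Char) (start : Nat) (h : start ≤ pre.length) :
    PySem.List.slice (pre ++ rest) (some (start : Int)) (some ((pre.length : Nat) : Int)) = pre.drop start := by
  rw [PySem.List.slice_natCast]
  rw [List.drop_append_of_le_length h]
  have : pre.length - start = (pre.drop start).length := by simp
  rw [this, List.take_left]

-- loop invariant: A's buffer is pre.drop start where pre is the consumed prefix and start B's cursor
lemma pvLoop_eq (rest : List Char) : ∀ (pre : List Char) (acc : List String) (start : Nat) (pd td : Int),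
    start ≤ pre.length →
    pvLoopA rest acc (pre.drop start) pd td = pvLoopB (pre ++ rest) rest pre.length acc start pd td := by
  induction rest with
  | nil =>
      intro pre acc start pd td h
      simp only [pvLoopA, pvLoopB, List.append_nil]
      rw [PySem.List.slice_from_natCast]
  | cons c rest ih =>
      intro pre acc start pd td h
      simp only [pvLoopA, pvLoopB]
      by_cases hc : c = ',' ∧ pd = 0 ∧ td = 0
      · simp only [if_pos hc]
        rw [pvSlice_pre pre (c :: rest) start h]
        have h2 : pre.length + 1 ≤ (pre ++ [c]).length := by simp
        have := ih (pre ++ [c]) (if PySem.Chars.strip (pre.drop start) ≠ [] then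
            acc ++ [String.ofList (PySem.Chars.strip (pre.drop start))] else acc) (pre.length + 1) pd td h2
        simp only [List.length_append, List.length_singleton] at this ⊢
        rw [show (pre ++ [c]).drop (pre.length + 1) = [] from by simp] at this
        rw [this]; simp
      · simp only [if_neg hc]
        have hcur : (pre ++ [c]).drop start = pre.drop start ++ [c] :=
          List.drop_append_of_le_length h
        have harr : (pre ++ [c]) ++ rest = pre ++ (c :: rest) := by simp
        have h2 : start ≤ pre.length + 1 := by omega
        have key := ih (pre ++ [c]) acc start
        rw [hcur, harr] at key
        simp only [List.length_append, List.length_singleton] at key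
        by_cases h1 : c = '('
        · subst h1
          have := key (pd + 1) td h2
          simpa using this
        · by_cases h3 : c = ')'
          · subst h3
            have := key (pd - 1) td h2
            simpa using this
          · by_cases h4 : c = '<'
            · subst h4
              have := key pd (td + 1) h2
              simpa using this
            · by_cases h5 : c = '>'
              · subst h5
                have := key pd (td - 1) h2
                simpa using this
              · have := key pd td h2
                simp only [if_neg h1, if_neg h3, if_neg (by simp [h1, h3] : ¬(c = '(' ∨ c = ')')),
                  if_neg h4, if_neg h5]
                exact this

-- ===== VERDICT (by name: the statement is the Claim_ definition above) =====
theorem smart_parameter_split_py_spec : Claim_equal_smart_parameter_split_py := by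
  intro s _
  unfold Spec_smart_parameter_split_py smart_parameter_split_py smart_parameter_split_py_alt
  have := pvLoop_eq s.toList [] [] 0 0 0 (by simp)
  simpa using this
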